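-- pv_equiv track=rewrite | github.com/stakemori/hilbert_sqrt5 | src/modstr.py | c_km2_1_11
-- ===== SOURCE A (Python) =====
-- def c_km2_1_11(k):
--     k1, k2 = [a % 3 for a in k]
--     if (k1, k2) in [(0, 0), (2, 2)]:
--         return 1
--     if k1 == 1 or k2 == 1:
--         return 0
--     if (k1, k2) in [(0, 2), (2, 0)]:
--         return -1
-- ===== SOURCE B (Python) =====
-- def c_km2_1_11(k):
--     k1, k2 = [a % 3 for a in k]
--     g = (1, 0, -1)
--     return g[k1] * g[k2]
-- ===== Notes on version B (the rewrite author's own statement) =====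
-- stated objective: simpler
-- what changed: Replaces the three-branch residue-pair casework with a multiplicative closed form g[k%3]*g[k%3] using the sign map (1,0,-1).
import Mathlib
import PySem

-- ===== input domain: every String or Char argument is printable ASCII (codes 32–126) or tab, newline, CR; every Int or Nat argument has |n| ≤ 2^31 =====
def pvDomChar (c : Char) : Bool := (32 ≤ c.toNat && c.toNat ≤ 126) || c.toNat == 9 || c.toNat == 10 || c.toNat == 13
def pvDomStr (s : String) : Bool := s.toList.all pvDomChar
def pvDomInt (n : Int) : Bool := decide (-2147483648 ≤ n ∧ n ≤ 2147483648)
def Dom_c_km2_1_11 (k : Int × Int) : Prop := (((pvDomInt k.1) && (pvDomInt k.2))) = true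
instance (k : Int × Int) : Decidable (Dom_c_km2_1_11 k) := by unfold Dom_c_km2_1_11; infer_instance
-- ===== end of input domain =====

-- B replaces A's residue-pair casework by the closed form g[k1]*g[k2] with sign map (1,0,-1); objective: simpler.

-- ===== PORT A =====
-- literal transliteration of A's branch chain; the final 0 is the unreachable
-- fall-through (mod 3 is always in {0,1,2}, and the branches cover all 9 pairs)
def c_km2_1_11 (k : Int × Int) : Int :=
  let k1 := PySem.Int.mod k.1 3
  let k2 := PySem.Int.mod k.2 3
  if (k1, k2) = (0, 0) ∨ (k1, k2) = (2, 2) then 1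
  else if k1 = 1 ∨ k2 = 1 then 0
  else if (k1, k2) = (0, 2) ∨ (k1, k2) = (2, 0) then -1
  else 0

-- ===== PORT B =====
-- g[i] : tuple (1, 0, -1) indexed by i (always in range since i = _ % 3)
def c_km2_1_11_alt (k : Int × Int) : Int :=
  let k1 := PySem.Int.mod k.1 3
  let k2 := PySem.Int.mod k.2 3
  ((PySem.List.pyGet? [(1 : Int), 0, -1] k1).getD 0) *
  ((PySem.List.pyGet? [(1 : Int), 0, -1] k2).getD 0)

-- ===== PRECONDITION & SPEC =====
def Spec_c_km2_1_11 (k : Int × Int) (out : Int) : Prop := out = c_km2_1_11_alt k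
instance (k : Int × Int) (out : Int) : Decidable (Spec_c_km2_1_11 k out) := by unfold Spec_c_km2_1_11; infer_instance

-- ===== CLAIM (what is proved, stated in full; the proofs are below) =====
def Claim_equal_c_km2_1_11 : Prop := ∀ (k : Int × Int), Dom_c_km2_1_11 k → Spec_c_km2_1_11 k (c_km2_1_11 k)

-- ===== LEMMAS AND PROOFS =====
theorem pv_mod3_cases (a : Int) :
    PySem.Int.mod a 3 = 0 ∨ PySem.Int.mod a 3 = 1 ∨ PySem.Int.mod a 3 = 2 := by
  rw [PySem.Int.mod_eq_emod_of_pos (by norm_num)]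
  omega

-- ===== VERDICT (by name: the statement is the Claim_ definition above) =====
theorem c_km2_1_11_spec : Claim_equal_c_km2_1_11 := by
  intro k _
  unfold Spec_c_km2_1_11 c_km2_1_11 c_km2_1_11_alt
  rcases pv_mod3_cases k.1 with h1 | h1 | h1 <;>
    rcases pv_mod3_cases k.2 with h2 | h2 | h2 <;>
    rw [PySem.Int.mod_eq_emod_of_pos (by norm_num)] at h1 h2 <;>
    simp [PySem.List.pyGet?, PySem.List.pyIdx?, h1, h2,
      Int.emod_emod_of_dvd, Int.dvd_iff_emod_eq_zero] <;> omega
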